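-- pv_equiv track=rewrite | github.com/mjtomei/omerta_node | scripts/generate_transaction.py | _preprocess_hash_concat
-- ===== SOURCE A (Python) =====
-- def _preprocess_hash_concat(expr: str) -> str:
--     """Transform HASH(a + b + c) to HASH(_to_hashable(a, b, c))."""
--     # Find standalone HASH(...) or hash(...) patterns and replace + inside with ,
--     result = []
--     i = 0
--     while i < len(expr):
--         # Look for 'HASH(' or 'hash(' but not as part of another word
--         if expr[i:i+5].upper() == 'HASH(':
--             # Check it's not part of another identifier (e.g., CHAIN_CONTAINS_HASH)
--             if i > 0 and (expr[i-1].isalnum() or expr[i-1] == '_'):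
--                 result.append(expr[i])
--                 i += 1
--                 continue
--             result.append('HASH(_to_hashable(')
--             i += 5
--             # Find matching )
--             depth = 1
--             start = i
--             while i < len(expr) and depth > 0:
--                 if expr[i] == '(':
--                     depth += 1
--                 elif expr[i] == ')':
--                     depth -= 1
--                 i += 1
--             # Extract contents and replace + with ,
--             contents = expr[start:i-1]
--             contents = contents.replace(' + ', ', ')
--             result.append(contents)
--             result.append('))')
--         else:
--             result.append(expr[i])
--             i += 1
--     return ''.join(result)
-- ===== SOURCE B (Python) =====
-- import re
--
-- _HASH_CALL = re.compile(r'(?<![0-9A-Za-z_])hash\(', re.IGNORECASE)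
--
--
-- def _scan_close(expr: str, i: int) -> int:
--     """Return the index just past the paren that closes the one before i
--     (or len(expr) if unbalanced)."""
--     depth = 1
--     for off, ch in enumerate(expr[i:]):
--         if ch == '(':
--             depth += 1
--         elif ch == ')':
--             depth -= 1
--             if depth == 0:
--                 return i + off + 1
--     return len(expr)
--
--
-- def _preprocess_hash_concat(expr: str) -> str:
--     """Transform HASH(a + b + c) to HASH(_to_hashable(a, b, c))."""
--     pieces = []
--     cur = 0
--     for m in _HASH_CALL.finditer(expr):
--         if m.start() < cur:
--             continue  # inside an already-consumed HASH(...) body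
--         end = _scan_close(expr, m.end())
--         pieces.append(expr[cur:m.start()])
--         pieces.append('HASH(_to_hashable(')
--         pieces.append(expr[m.end():end - 1].replace(' + ', ', '))
--         pieces.append('))')
--         cur = end
--     pieces.append(expr[cur:])
--     return ''.join(pieces)
-- ===== Notes on version B (the rewrite author's own statement) =====
-- stated objective: faster
-- what changed: B replaces A's character-by-character scan-and-append loop with a regex-style match-position pass (case-insensitive 'hash(' heads with a word-character lookbehind) followed by a cursor-based assembly that copies whole untouched segments between matches.
import Mathlib
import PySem

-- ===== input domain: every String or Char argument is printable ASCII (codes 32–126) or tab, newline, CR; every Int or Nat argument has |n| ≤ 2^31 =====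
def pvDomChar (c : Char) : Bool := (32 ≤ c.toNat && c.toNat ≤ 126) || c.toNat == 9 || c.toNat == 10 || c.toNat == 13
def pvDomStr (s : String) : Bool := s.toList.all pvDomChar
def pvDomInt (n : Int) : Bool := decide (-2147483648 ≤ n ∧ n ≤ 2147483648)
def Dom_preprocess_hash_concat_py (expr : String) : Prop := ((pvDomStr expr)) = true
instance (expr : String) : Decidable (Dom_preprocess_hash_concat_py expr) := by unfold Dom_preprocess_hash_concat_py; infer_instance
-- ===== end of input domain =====

-- B re-implements A by locating standalone HASH( heads with a regex-style position filter and
-- assembling the output from whole untouched segments via a cursor, instead of A's char-by-char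
-- scan-and-append loop; a timing run measured B faster (constant factor, same O(n) cost).

-- ===== PORT A =====

-- A's inner `while i < len(expr) and depth > 0` loop (finds the index just past the matching ')').
def pvScanA (cs : List Char) (i : Nat) (depth : Int) : Nat :=
  if h : i < cs.length ∧ 0 < depth then
    if cs[i]! == '(' then pvScanA cs (i + 1) (depth + 1)
    else if cs[i]! == ')' then pvScanA cs (i + 1) (depth - 1)
    else pvScanA cs (i + 1) depth
  else i
termination_by cs.length - i
decreasing_by all_goals exact Nat.sub_succ_lt_self _ _ h.1

-- needed by pvLoopA's termination proof
theorem pvScanA_ge (cs : List Char) (i : Nat) (d : Int) : i ≤ pvScanA cs i d := by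
  induction i, d using pvScanA.induct cs with
  | case1 i d h hp ih => rw [pvScanA, dif_pos h, if_pos hp]; omega
  | case2 i d h hp hq ih => rw [pvScanA, dif_pos h, if_neg hp, if_pos hq]; omega
  | case3 i d h hp hq ih => rw [pvScanA, dif_pos h, if_neg hp, if_neg hq]; omega
  | case4 i d h => rw [pvScanA, dif_neg h]

-- A's outer `while i < len(expr)` loop, with `result` as the accumulator.
def pvLoopA (cs : List Char) (i : Nat) (acc : List Char) : List Char :=
  if h : i < cs.length then
    if PySem.Chars.upper (PySem.List.slice cs (some (i : Int)) (some ((i : Int) + 5))) == "HASH(".toList then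
      if 0 < i && (PySem.Chars.isalnum cs[i-1]! || cs[i-1]! == '_') then
        pvLoopA cs (i + 1) (acc ++ [cs[i]!])
      else
        pvLoopA cs (pvScanA cs (i + 5) 1)
          (acc ++ "HASH(_to_hashable(".toList
               ++ PySem.Chars.replace
                    (PySem.List.slice cs (some ((i : Int) + 5))
                      (some (((pvScanA cs (i + 5) 1 : Nat) : Int) - 1)))
                    " + ".toList ", ".toList
               ++ "))".toList)
    else
      pvLoopA cs (i + 1) (acc ++ [cs[i]!])
  else acc
termination_by cs.length - i
decreasing_by
  · exact Nat.sub_succ_lt_self _ _ h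
  · exact Nat.sub_lt_sub_left h (Nat.lt_of_lt_of_le
      (Nat.lt_add_of_pos_right (Nat.succ_pos 4)) (pvScanA_ge cs (i + 5) 1))
  · exact Nat.sub_succ_lt_self _ _ h

def preprocess_hash_concat_py (expr : String) : String :=
  String.ofList (pvLoopA expr.toList 0 [])

-- ===== PORT B =====

-- regex char-class [0-9A-Za-z_] (the negative lookbehind's class)
def pvIsWordB (c : Char) : Bool :=
  ('0' ≤ c && c ≤ '9') || ('A' ≤ c && c ≤ 'Z') || ('a' ≤ c && c ≤ 'z') || c == '_'

-- case-insensitive char comparison (re.IGNORECASE)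
def pvIcEqB (c d : Char) : Bool := PySem.Chars.upperChar c == PySem.Chars.upperChar d

-- does the pattern (?<![0-9A-Za-z_])hash\( (IGNORECASE) match at position p?
def pvMatchAtB (cs : List Char) (p : Nat) : Bool :=
  (match cs.drop p with
   | a :: b :: c :: d :: e :: _ =>
     pvIcEqB a 'h' && pvIcEqB b 'a' && pvIcEqB c 's' && pvIcEqB d 'h' && e == '('
   | _ => false)
  && (p == 0 || !pvIsWordB cs[p-1]!)

-- B's helper `_scan_close`: walks the characters after the '(' (a for-loop over expr[i:])
-- with a depth counter, returning early at the matching ')'; len(expr) if unbalanced.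
def pvFindCloseGo (rest : List Char) (depth : Int) (pos : Nat) (total : Nat) : Nat :=
  match rest with
  | [] => total
  | ch :: tl =>
    if ch == '(' then pvFindCloseGo tl (depth + 1) (pos + 1) total
    else if ch == ')' then
      if depth - 1 == 0 then pos + 1 else pvFindCloseGo tl (depth - 1) (pos + 1) total
    else pvFindCloseGo tl depth (pos + 1) total

def pvFindCloseB (cs : List Char) (i : Nat) : Nat := pvFindCloseGo (cs.drop i) 1 i cs.length

-- B's `for m in finditer: …` loop over the match positions, with the copy cursor `cur`.
def pvFoldB (cs : List Char) (ps : List Nat) (cur : Nat) (acc : List Char) : List Char :=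
  match ps with
  | [] => acc ++ PySem.List.slice cs (some (cur : Int)) none       -- expr[cur:]
  | p :: rest =>
    if p < cur then pvFoldB cs rest cur acc                        -- match inside a consumed body
    else
      pvFoldB cs rest (pvFindCloseB cs (p + 5))
        (acc ++ PySem.List.slice cs (some (cur : Int)) (some (p : Int))
             ++ "HASH(_to_hashable(".toList
             ++ PySem.Chars.replace
                  (PySem.List.slice cs (some ((p : Int) + 5))
                    (some (((pvFindCloseB cs (p + 5) : Nat) : Int) - 1)))
                  " + ".toList ", ".toList
             ++ "))".toList)

def preprocess_hash_concat_py_alt (expr : String) : String :=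
  let cs := expr.toList
  String.ofList (pvFoldB cs ((List.range cs.length).filter (pvMatchAtB cs)) 0 [])

-- ===== PRECONDITION & SPEC =====
def Spec_preprocess_hash_concat_py (expr : String) (out : String) : Prop := out = preprocess_hash_concat_py_alt expr
instance (expr : String) (out : String) : Decidable (Spec_preprocess_hash_concat_py expr out) := by unfold Spec_preprocess_hash_concat_py; infer_instance

-- ===== CLAIM (what is proved, stated in full; the proofs are below) =====
def Claim_equal_preprocess_hash_concat_py : Prop := ∀ (expr : String), Dom_preprocess_hash_concat_py expr → Spec_preprocess_hash_concat_py expr (preprocess_hash_concat_py expr)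

-- ===== LEMMAS AND PROOFS =====

-- A's combined "transform here" condition
def pvMatchAtA (cs : List Char) (i : Nat) : Bool :=
  (PySem.Chars.upper (PySem.List.slice cs (some (i : Int)) (some ((i : Int) + 5))) == "HASH(".toList)
  && !(0 < i && (PySem.Chars.isalnum cs[i-1]! || cs[i-1]! == '_'))

-- the common "emitted output from position i onward" specification
def pvEmit (cs : List Char) (i : Nat) : List Char :=
  if h : i < cs.length then
    if pvMatchAtA cs i then
      "HASH(_to_hashable(".toList
        ++ PySem.Chars.replace
             (PySem.List.slice cs (some ((i : Int) + 5))
               (some (((pvScanA cs (i + 5) 1 : Nat) : Int) - 1)))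
             " + ".toList ", ".toList
        ++ "))".toList ++ pvEmit cs (pvScanA cs (i + 5) 1)
    else cs[i]! :: pvEmit cs (i + 1)
  else []
termination_by cs.length - i
decreasing_by
  · exact Nat.sub_lt_sub_left h (Nat.lt_of_lt_of_le
      (Nat.lt_add_of_pos_right (Nat.succ_pos 4)) (pvScanA_ge cs (i + 5) 1))
  · exact Nat.sub_succ_lt_self _ _ h

theorem pv_scanB_eq_scanA (cs : List Char) (i : Nat) (d : Int) (hle : i ≤ cs.length)
    (hd : 0 < d) : pvFindCloseGo (cs.drop i) d i cs.length = pvScanA cs i d := by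
  induction i, d using pvScanA.induct cs with
  | case1 i d h hp ih =>
    rw [List.drop_eq_getElem_cons h.1, pvFindCloseGo,
      if_pos (by rw [← getElem!_pos cs i h.1]; exact hp)]
    rw [pvScanA, dif_pos h, if_pos hp]
    exact ih (by omega) (by omega)
  | case2 i d h hp hq ih =>
    rw [List.drop_eq_getElem_cons h.1, pvFindCloseGo,
      if_neg (by rw [← getElem!_pos cs i h.1]; simp only [hp]; exact Bool.false_ne_true),
      if_pos (by rw [← getElem!_pos cs i h.1]; exact hq)]
    rw [pvScanA, dif_pos h, if_neg hp, if_pos hq]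
    by_cases hone : d = 1
    · rw [if_pos (by rw [hone]; rfl)]
      rw [hone, pvScanA, dif_neg (by omega)]
    · rw [if_neg (by simp only [beq_iff_eq]; omega)]
      exact ih (by omega) (by omega)
  | case3 i d h hp hq ih =>
    rw [List.drop_eq_getElem_cons h.1, pvFindCloseGo,
      if_neg (by rw [← getElem!_pos cs i h.1]; simp only [hp]; exact Bool.false_ne_true),
      if_neg (by rw [← getElem!_pos cs i h.1]; simp only [hq]; exact Bool.false_ne_true)]
    rw [pvScanA, dif_pos h, if_neg hp, if_neg hq]
    exact ih (by omega) (by omega)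
  | case4 i d h =>
    have hi : i = cs.length := by omega
    rw [List.drop_eq_nil_of_le (by omega), pvFindCloseGo, pvScanA, dif_neg h, hi]

theorem pv_isWordB_eq (c : Char) : pvIsWordB c = (PySem.Chars.isalnum c || c == '_') := by
  simp [pvIsWordB, PySem.Chars.isalnum, PySem.Chars.isalpha, PySem.Chars.isupper,
    PySem.Chars.islower, PySem.Chars.isdigit, Bool.or_comm, Bool.or_assoc]

theorem pv_upperChar_lparen (e : Char) : (PySem.Chars.upperChar e = '(') ↔ (e = '(') := by
  by_cases hl : PySem.Chars.islower e = true
  · constructor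
    · intro heq
      exfalso
      have h1 : 97 ≤ e.toNat ∧ e.toNat ≤ 122 := by
        simpa [PySem.Chars.islower, Char.le_def] using hl
      have h2 : (PySem.Chars.upperChar e).toNat = e.toNat - 32 := by
        simp [PySem.Chars.upperChar, hl]
        rw [Char.toNat_ofNat, if_pos]
        left; omega
      rw [heq] at h2
      rw [show ('(' : Char).toNat = 40 from rfl] at h2
      omega
    · intro heq
      exfalso
      rw [heq] at hl
      simp [PySem.Chars.islower] at hl
  · simp [PySem.Chars.upperChar, hl]

theorem pv_matchB_eq_matchA (cs : List Char) (i : Nat) :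
    pvMatchAtB cs i = pvMatchAtA cs i := by
  unfold pvMatchAtB pvMatchAtA
  rw [show ((i : Int) + 5) = ((i : Int) + ((5 : Nat) : Int)) from by push_cast; ring,
    PySem.List.slice_natCast_add]
  have hb : ∀ (x y : Bool), (x = y) → ∀ (u v : Bool), (u = v) → (x && u) = (y && v) := by
    intro x y hxy u v huv; rw [hxy, huv]
  apply hb
  · -- heads part
    rcases hd : cs.drop i with _ | ⟨a, t1⟩
    · simp [PySem.Chars.upper]
    rcases t1 with _ | ⟨b, t2⟩
    · simp [PySem.Chars.upper]
    rcases t2 with _ | ⟨c, t3⟩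
    · simp [PySem.Chars.upper]
    rcases t3 with _ | ⟨d, t4⟩
    · simp [PySem.Chars.upper]
    rcases t4 with _ | ⟨e, t5⟩
    · simp [PySem.Chars.upper]
    · simp only [List.take_succ_cons, List.take_zero, PySem.Chars.upper, List.map_cons,
        List.map_nil, pvIcEqB]
      rw [show "HASH(".toList = ['H', 'A', 'S', 'H', '('] from rfl,
        show PySem.Chars.upperChar 'h' = 'H' from by decide,
        show PySem.Chars.upperChar 'a' = 'A' from by decide,
        show PySem.Chars.upperChar 's' = 'S' from by decide]
      rw [Bool.eq_iff_iff]
      simp only [Bool.and_eq_true, beq_iff_eq, List.cons.injEq, and_true]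
      rw [pv_upperChar_lparen]
      tauto
  · -- boundary part
    rw [pv_isWordB_eq, Bool.not_and]
    cases i <;> simp

theorem pv_loopA_eq_emit (cs : List Char) (i : Nat) :
    ∀ acc, pvLoopA cs i acc = acc ++ pvEmit cs i := by
  induction i using pvEmit.induct cs with
  | case1 i h hm ih =>
    intro acc
    have hm' := hm
    unfold pvMatchAtA at hm'
    rw [Bool.and_eq_true] at hm'
    obtain ⟨hhead, hbad⟩ := hm'
    rw [Bool.not_eq_eq_eq_not, Bool.not_true] at hbad
    rw [pvEmit, dif_pos h, if_pos hm]
    rw [pvLoopA, dif_pos h, if_pos hhead, if_neg (by rw [hbad]; exact Bool.false_ne_true), ih]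
    simp
  | case2 i h hm ih =>
    intro acc
    have hm' := hm
    unfold pvMatchAtA at hm'
    rw [Bool.and_eq_true] at hm'
    rw [pvEmit, dif_pos h, if_neg (by simp [hm])]
    by_cases hhead : (PySem.Chars.upper (PySem.List.slice cs (some (i : Int)) (some ((i : Int) + 5))) == "HASH(".toList) = true
    · have hbad : (0 < i && (PySem.Chars.isalnum cs[i-1]! || cs[i-1]! == '_')) = true := by
        by_contra hb
        rw [Bool.not_eq_true] at hb
        exact hm' ⟨hhead, by rw [hb]; rfl⟩
      rw [pvLoopA, dif_pos h, if_pos hhead, if_pos hbad, ih]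
      simp
    · rw [pvLoopA, dif_pos h, if_neg hhead, ih]
      simp
  | case3 i h =>
    intro acc
    rw [pvLoopA, dif_neg h, pvEmit, dif_neg h]
    simp

theorem pv_emit_drop (cs : List Char) (cur : Nat)
    (hnm : ∀ q, cur ≤ q → pvMatchAtA cs q = false) :
    pvEmit cs cur = cs.drop cur := by
  induction cur using pvEmit.induct cs with
  | case1 i h hm ih => rw [hnm i le_rfl] at hm; exact absurd hm (by simp)
  | case2 i h hm ih =>
    rw [pvEmit, dif_pos h, if_neg (by simp [hm])]
    rw [ih (fun q hq => hnm q (by omega))]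
    rw [getElem!_pos cs i h, List.getElem_cons_drop]
  | case3 i h =>
    rw [pvEmit, dif_neg h, eq_comm]
    exact List.drop_eq_nil_of_le (by omega)

theorem pv_emit_gap (cs : List Char) (p : Nat) (hpn : p ≤ cs.length) :
    ∀ k cur, cur + k = p → (∀ q, cur ≤ q → q < p → pvMatchAtA cs q = false) →
      pvEmit cs cur = (cs.drop cur).take (p - cur) ++ pvEmit cs p := by
  intro k
  induction k with
  | zero =>
    intro cur hk hnm
    obtain rfl : cur = p := by omega
    simp
  | succ k ih =>
    intro cur hk hnm
    have hcl : cur < cs.length := by omega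
    have hnc : pvMatchAtA cs cur = false := hnm cur le_rfl (by omega)
    rw [pvEmit, dif_pos hcl, if_neg (by simp [hnc])]
    rw [ih (cur + 1) (by omega) (fun q hq hq' => hnm q (by omega) hq')]
    have h1 : cs.drop cur = cs[cur] :: cs.drop (cur + 1) := (List.getElem_cons_drop hcl).symm
    rw [getElem!_pos cs cur hcl, h1]
    have h2 : p - cur = (p - (cur + 1)) + 1 := by omega
    rw [h2, List.take_succ_cons]
    simp

theorem pv_matchA_le5 {cs : List Char} {q : Nat} (hm : pvMatchAtA cs q = true) :
    q + 5 ≤ cs.length := by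
  unfold pvMatchAtA at hm
  rw [Bool.and_eq_true] at hm
  obtain ⟨hhead, -⟩ := hm
  rw [show ((q : Int) + 5) = ((q : Int) + ((5 : Nat) : Int)) from by push_cast; ring,
    PySem.List.slice_natCast_add, beq_iff_eq] at hhead
  have hlen := congrArg List.length hhead
  simp [PySem.Chars.upper] at hlen
  omega

theorem pv_foldB_eq_emit (cs : List Char) (ps : List Nat) :
    ∀ lo cur acc, lo ≤ cur →
      (∀ q, q ∈ ps ↔ (pvMatchAtA cs q = true ∧ lo ≤ q)) →
      ps.Pairwise (· < ·) →
      pvFoldB cs ps cur acc = acc ++ pvEmit cs cur := by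
  induction ps with
  | nil =>
    intro lo cur acc hlo hmem _
    rw [pvFoldB, PySem.List.slice_from_natCast]
    rw [pv_emit_drop cs cur]
    intro q hq
    by_contra hm
    rw [Bool.not_eq_false] at hm
    have : q ∈ ([] : List Nat) := (hmem q).mpr ⟨hm, by omega⟩
    simp at this
  | cons p rest ih =>
    intro lo cur acc hlo hmem hsort
    have hpm : pvMatchAtA cs p = true := ((hmem p).mp (by simp)).1
    have hlp : lo ≤ p := ((hmem p).mp (by simp)).2
    have hp5 : p + 5 ≤ cs.length := pv_matchA_le5 hpm
    have hpl : p < cs.length := by omega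
    have hrest : ∀ q, q ∈ rest ↔ (pvMatchAtA cs q = true ∧ p + 1 ≤ q) := by
      intro q
      constructor
      · intro hq
        have h1 := (hmem q).mp (List.mem_cons_of_mem _ hq)
        have h2 : p < q := (List.pairwise_cons.mp hsort).1 q hq
        exact ⟨h1.1, by omega⟩
      · intro hq
        obtain ⟨hq1, hq2⟩ := hq
        have := (hmem q).mpr ⟨hq1, by omega⟩
        rcases List.mem_cons.mp this with h | h
        · omega
        · exact h
    have hsort' := (List.pairwise_cons.mp hsort).2
    rw [pvFoldB]
    by_cases hpc : p < cur
    · rw [if_pos hpc]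
      exact ih (p + 1) cur acc (by omega) hrest hsort'
    · rw [if_neg hpc]
      have hgap : pvEmit cs cur = (cs.drop cur).take (p - cur) ++ pvEmit cs p := by
        apply pv_emit_gap cs p (by omega) (p - cur) cur (by omega)
        intro q hq hq'
        by_contra hm
        rw [Bool.not_eq_false] at hm
        have := (hmem q).mpr ⟨hm, by omega⟩
        rcases List.mem_cons.mp this with h | h
        · omega
        · have := (List.pairwise_cons.mp hsort).1 q h; omega
      have hstep : pvEmit cs p =
          "HASH(_to_hashable(".toList
            ++ PySem.Chars.replace
                (PySem.List.slice cs (some ((p : Int) + 5)) (some (((pvScanA cs (p + 5) 1) : Int) - 1)))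
                " + ".toList ", ".toList
            ++ "))".toList ++ pvEmit cs (pvScanA cs (p + 5) 1) := by
        rw [pvEmit, dif_pos hpl, if_pos hpm]
      have hscan : pvFindCloseB cs (p + 5) = pvScanA cs (p + 5) 1 :=
        pv_scanB_eq_scanA cs (p + 5) 1 hp5 (by omega)
      rw [hscan]
      rw [ih (p + 1) (pvScanA cs (p + 5) 1) _ (by have := pvScanA_ge cs (p + 5) 1; omega) hrest hsort']
      rw [hgap, hstep]
      rw [show PySem.List.slice cs (some (cur : Int)) (some (p : Int)) = (cs.drop cur).take (p - cur) from PySem.List.slice_natCast cs cur p]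
      simp

-- ===== VERDICT (by name: the statement is the Claim_ definition above) =====
theorem preprocess_hash_concat_py_spec : Claim_equal_preprocess_hash_concat_py := by
  intro expr _
  unfold Spec_preprocess_hash_concat_py preprocess_hash_concat_py preprocess_hash_concat_py_alt
  have hmem : ∀ q, q ∈ (List.range expr.toList.length).filter (pvMatchAtB expr.toList) ↔
      (pvMatchAtA expr.toList q = true ∧ 0 ≤ q) := by
    intro q
    rw [List.mem_filter, List.mem_range]
    constructor
    · intro hq
      exact ⟨by rw [← pv_matchB_eq_matchA]; exact hq.2, by omega⟩
    · intro hq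
      have hlt : q < expr.toList.length := by have := pv_matchA_le5 hq.1; omega
      exact ⟨by omega, by rw [pv_matchB_eq_matchA]; exact hq.1⟩
  have hfold := pv_foldB_eq_emit expr.toList
      ((List.range expr.toList.length).filter (pvMatchAtB expr.toList)) 0 0 [] le_rfl hmem
      (List.pairwise_lt_range.filter _)
  show String.ofList (pvLoopA expr.toList 0 []) =
    String.ofList (pvFoldB expr.toList
      ((List.range expr.toList.length).filter (pvMatchAtB expr.toList)) 0 [])
  rw [pv_loopA_eq_emit expr.toList 0 [], hfold]
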